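-- pv_equiv track=rewrite | github.com/DooDuZ/sparta_python | daily/boj1235.py | solution
-- ===== SOURCE A (Python) =====
-- def solution(params):
--     n, student_ids = params
--
--     lng = len(str(student_ids[0]))
--
--     for i in range(1, lng + 1):
--         cnt_set = set()
--
--         for student_id in student_ids:
--             cnt_set.add(student_id % pow(10, i))
--
--         if len(cnt_set) == n:
--             return i
--
--     return 1
-- ===== SOURCE B (Python) =====
-- def solution(params):
--     n, student_ids = params
--
--     lng = len(str(student_ids[0]))
--
--     def distinct(i):
--         return len({x % 10 ** i for x in student_ids})
--
--     lo, hi = 1, lng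
--     while lo < hi:
--         mid = (lo + hi) // 2
--         if distinct(mid) >= n:
--             hi = mid
--         else:
--             lo = mid + 1
--     return lo if distinct(lo) == n else 1
-- ===== Notes on version B (the rewrite author's own statement) =====
-- stated objective: faster
-- what changed: A scans suffix lengths 1..len(str(ids[0])) linearly, building a distinct-suffix set for each; B binary-searches the smallest length whose distinct-suffix count reaches n (the count is monotone in the length) and checks it, doing O(log L) distinct-count passes instead of O(L).
import Mathlib
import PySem

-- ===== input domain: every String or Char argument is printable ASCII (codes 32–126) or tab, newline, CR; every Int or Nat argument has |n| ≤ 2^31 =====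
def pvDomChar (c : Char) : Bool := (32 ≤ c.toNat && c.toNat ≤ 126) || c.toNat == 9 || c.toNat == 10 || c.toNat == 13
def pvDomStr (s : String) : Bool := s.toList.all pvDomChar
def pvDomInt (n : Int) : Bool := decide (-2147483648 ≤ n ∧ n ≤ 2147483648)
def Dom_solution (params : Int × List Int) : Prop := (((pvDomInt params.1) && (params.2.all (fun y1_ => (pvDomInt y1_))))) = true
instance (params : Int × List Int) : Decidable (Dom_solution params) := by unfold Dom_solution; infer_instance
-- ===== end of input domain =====

-- B replaces A's linear scan over suffix lengths by a binary search on the (monotone) number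
-- of distinct suffixes; objective: faster (O(log L) distinct-count passes instead of O(L); measured 1.5x).

-- ===== PORT A =====
-- for i in range(1, lng+1): cnt_set = set(); for sid in ids: cnt_set.add(sid % 10**i); if len == n: return i / return 1
def pvLoopA (n : Int) (ids : List Int) : List Int → Int
  | [] => 1
  | i :: rest =>
      let cntSet : PySem.Set Int :=
        ids.foldl (fun s x => PySem.Set.add s (PySem.Int.mod x ((10 : Int) ^ i.toNat))) PySem.Set.empty
      if (cntSet.length : Int) = n then i else pvLoopA n ids rest

def solution (params : Int × List Int) : Int :=
  match PySem.List.pyGet? params.2 0 with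
  | none => 0   -- unreachable under Pre_solution (Python raises IndexError on [])
  | some h =>
      let lng := PySem.Str.len (PySem.Int.toStr h)
      pvLoopA params.1 params.2 (PySem.List.pyRange 1 (lng + 1) 1)

-- ===== PORT B =====
-- distinct(i) = len({x % 10**i for x in ids})
def pvDistinct (ids : List Int) (i : Nat) : Int :=
  ((PySem.Set.ofList (ids.map (fun x => PySem.Int.mod x ((10 : Int) ^ i)))).length : Int)

-- while lo < hi: mid = (lo+hi)//2; if distinct(mid) >= n: hi = mid else lo = mid+1
def pvBS (n : Int) (ids : List Int) (lo hi : Nat) : Nat :=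
  if _h : lo < hi then
    let mid := (lo + hi) / 2
    if n ≤ pvDistinct ids mid then pvBS n ids lo mid else pvBS n ids (mid + 1) hi
  else lo
termination_by hi - lo
decreasing_by all_goals omega

def solution_alt (params : Int × List Int) : Int :=
  match PySem.List.pyGet? params.2 0 with
  | none => 0   -- unreachable under Pre_solution (Python raises IndexError on [])
  | some h =>
      let lng := PySem.Str.len (PySem.Int.toStr h)
      let lo := pvBS params.1 params.2 1 lng.toNat
      if pvDistinct params.2 lo = params.1 then (lo : Int) else 1

-- ===== PRECONDITION & SPEC =====
-- Pre_ excludes only the empty id list, on which Python A raises IndexError.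
def Pre_solution (params : Int × List Int) : Prop := params.2 ≠ []
instance (params : Int × List Int) : Decidable (Pre_solution params) := by unfold Pre_solution; infer_instance
def pvWitness_solution : (Int × List Int) := (2, [13, 23])

def Spec_solution (params : Int × List Int) (out : Int) : Prop := out = solution_alt params
instance (params : Int × List Int) (out : Int) : Decidable (Spec_solution params out) := by unfold Spec_solution; infer_instance

-- ===== CLAIM (what is proved, stated in full; the proofs are below) =====
def Claim_equal_solution : Prop := ∀ (params : Int × List Int), Dom_solution params → Pre_solution params → Spec_solution params (solution params)

-- ===== LEMMAS AND PROOFS =====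

-- str(n) is never empty
theorem pv_toDigitsCore_len (b : Nat) : ∀ (fuel n : Nat) (ds : List Char), ds.length ≤ (Nat.toDigitsCore b fuel n ds).length := by
  intro fuel
  induction fuel with
  | zero => intro n ds; simp [Nat.toDigitsCore]
  | succ m ih =>
    intro n ds
    simp only [Nat.toDigitsCore]
    split
    · simp
    · exact le_trans (by simp) (ih _ _)

theorem pv_toStr_len_pos (n : Int) : 1 ≤ PySem.Str.len (PySem.Int.toStr n) := by
  rw [PySem.Str.len_eq, PySem.Int.toList_toStr]
  simp only [PySem.Int.toChars]
  split
  · simp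
  · have : 1 ≤ (Nat.toDigits 10 n.toNat).length := by
      unfold Nat.toDigits
      simp only [Nat.toDigitsCore]
      split
      · simp
      · exact le_trans (by simp) (pv_toDigitsCore_len 10 _ _ _)
    exact_mod_cast this

-- A's inner foldl-built set is set(map(...)), i.e. pvDistinct
theorem pv_bridge (ids : List Int) (i : Int) :
    ((ids.foldl (fun s x => PySem.Set.add s (PySem.Int.mod x ((10 : Int) ^ i.toNat))) PySem.Set.empty).length : Int)
      = pvDistinct ids i.toNat := by
  unfold pvDistinct
  rw [← PySem.Set.update_map_eq_foldl_add, PySem.Set.update_empty]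

-- distinct count of an image is at most the distinct count
theorem pv_ofList_map_le (l : List Int) (g : Int → Int) :
    (PySem.Set.ofList (l.map g)).length ≤ (PySem.Set.ofList l).length := by
  have h1 : ∀ (xs : List Int), (PySem.Set.ofList xs).length = xs.toFinset.card := by
    intro xs
    rw [← List.toFinset_card_of_nodup (PySem.Set.nodup_ofList xs)]
    congr 1
    ext a
    simp [PySem.Set.mem_ofList]
  rw [h1, h1]
  have h2 : (List.map g l).toFinset = Finset.image g l.toFinset := by ext a; simp
  rw [h2]
  exact Finset.card_image_le

-- the number of distinct last-i-digit suffixes is monotone in i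
theorem pvDistinct_mono (ids : List Int) {i j : Nat} (hij : i ≤ j) :
    pvDistinct ids i ≤ pvDistinct ids j := by
  unfold pvDistinct
  have hmap : ids.map (fun x => PySem.Int.mod x ((10:Int)^i))
      = (ids.map (fun x => PySem.Int.mod x ((10:Int)^j))).map (fun y => PySem.Int.mod y ((10:Int)^i)) := by
    rw [List.map_map]
    apply List.map_congr_left
    intro x _
    have p10i : (0:Int) < 10^i := by positivity
    have p10j : (0:Int) < 10^j := by positivity
    simp only [Function.comp]
    rw [PySem.Int.mod_eq_emod_of_pos p10i, PySem.Int.mod_eq_emod_of_pos p10j, PySem.Int.mod_eq_emod_of_pos p10i]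
    exact (Int.emod_emod_of_dvd x (pow_dvd_pow 10 hij)).symm
  rw [hmap]
  exact_mod_cast pv_ofList_map_le _ _

-- A's loop skips a block on which the count never equals n
theorem pvLoopA_append (n : Int) (ids : List Int) :
    ∀ (xs rest : List Int), (∀ i ∈ xs, pvDistinct ids i.toNat ≠ n) →
    pvLoopA n ids (xs ++ rest) = pvLoopA n ids rest := by
  intro xs
  induction xs with
  | nil => intro rest _; simp
  | cons i xs ih =>
    intro rest h
    simp only [List.cons_append, pvLoopA]
    rw [pv_bridge ids i, if_neg (h i List.mem_cons_self)]
    exact ih rest (fun j hj => h j (List.mem_cons_of_mem _ hj))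

-- binary-search invariant: the result r satisfies lo ≤ r ≤ hi, all k < r fail, and (n ≤ distinct r or r = hi)
theorem pvBS_spec (n : Int) (ids : List Int) :
    ∀ (lo hi : Nat), lo ≤ hi → (∀ k, 1 ≤ k → k < lo → pvDistinct ids k < n) →
    lo ≤ pvBS n ids lo hi ∧ pvBS n ids lo hi ≤ hi ∧
      (∀ k, 1 ≤ k → k < pvBS n ids lo hi → pvDistinct ids k < n) ∧
      (n ≤ pvDistinct ids (pvBS n ids lo hi) ∨ pvBS n ids lo hi = hi) := by
  intro lo hi
  induction lo, hi using pvBS.induct n ids with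
  | case1 lo hi hlt mid hge ih =>
    intro _ hfail
    have hmid : mid = (lo + hi) / 2 := rfl
    rw [pvBS, dif_pos hlt, if_pos hge, ← hmid]
    obtain ⟨h1, h2, h3, h4⟩ := ih (by omega) hfail
    refine ⟨h1, by omega, h3, ?_⟩
    rcases h4 with h4 | h4
    · exact Or.inl h4
    · exact Or.inl (by rw [h4]; exact hge)
  | case2 lo hi hlt mid hge ih =>
    intro _ hfail
    have hmid : mid = (lo + hi) / 2 := rfl
    rw [pvBS, dif_pos hlt, if_neg hge, ← hmid]
    have hfail' : ∀ k, 1 ≤ k → k < mid + 1 → pvDistinct ids k < n := by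
      intro k hk1 hk2
      by_cases hklo : k < lo
      · exact hfail k hk1 hklo
      · have : pvDistinct ids k ≤ pvDistinct ids mid := pvDistinct_mono ids (by omega)
        omega
    obtain ⟨h1, h2, h3, h4⟩ := ih (by omega) hfail'
    exact ⟨by omega, h2, h3, h4⟩
  | case3 lo hi hlt =>
    intro hle hfail
    rw [pvBS, dif_neg hlt]
    exact ⟨le_refl _, hle, hfail, Or.inr (by omega)⟩

-- ===== VERDICT (by name: the statement is the Claim_ definition above) =====
theorem solution_spec : Claim_equal_solution := by
  unfold Claim_equal_solution
  intro params _ hpre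
  unfold Spec_solution
  obtain ⟨n, ids⟩ := params
  cases ids with
  | nil => exact absurd rfl hpre
  | cons x t =>
    simp only [solution, solution_alt, PySem.List.pyGet?_zero, List.getElem?_cons_zero]
    set lng := PySem.Str.len (PySem.Int.toStr x) with hlng
    have hposl : 1 ≤ lng := pv_toStr_len_pos x
    set L := lng.toNat with hLdef
    have hcast : (L : Int) = lng := by omega
    obtain ⟨h1, h2, h3, h4⟩ := pvBS_spec n (x :: t) 1 L (by omega) (by intro k hk1 hk2; omega)
    set r := pvBS n (x :: t) 1 L with hr
    by_cases hcr : pvDistinct (x :: t) r = n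
    · rw [if_pos hcr]
      rw [PySem.List.pyRange_one_append 1 (r : Int) (lng + 1) (by exact_mod_cast h1) (by omega)]
      rw [pvLoopA_append n (x :: t) _ _ ?side]
      case side =>
        intro i hi
        rw [PySem.List.mem_pyRange_one] at hi
        have hlt := h3 i.toNat (by omega) (by omega)
        omega
      rw [PySem.List.pyRange_one_cons (by omega : (r : Int) < lng + 1)]
      simp only [pvLoopA]
      rw [pv_bridge (x :: t) (r : Int)]
      simp only [Int.toNat_natCast]
      rw [if_pos hcr]
    · rw [if_neg hcr]
      rw [← List.append_nil (PySem.List.pyRange 1 (lng + 1) 1)]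
      rw [pvLoopA_append n (x :: t) _ _ ?fail]
      case fail =>
        intro i hi
        rw [PySem.List.mem_pyRange_one] at hi
        intro heq
        set k := i.toNat with hk
        have hk1 : 1 ≤ k := by omega
        have hkL : k ≤ L := by omega
        rcases Nat.lt_or_ge k r with hklt | hkge
        · have := h3 k hk1 hklt; omega
        · rcases h4 with h4 | h4
          · have hmono := pvDistinct_mono (x :: t) hkge
            omega
          · rcases Nat.eq_or_lt_of_le hkge with hkeq | hkgt
            · exact hcr (hkeq ▸ heq)
            · omega
      rfl
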